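-- pv_equiv track=rewrite | github.com/JamesWo/Algorithms | topcoder/division2-2/TrafficCongestionDivTwo.l2.SRM585.py | theMinCars
-- ===== SOURCE A (Python) =====
-- def theMinCars(treeHeight):
--      counts = [ 0 ] * (treeHeight+2)
--      counts[ 0 ] = 1
--      counts[ 1 ] = 1
--      for i in range(2, treeHeight+1):
--          counts[ i ] = 1
--          for j in range( 0, i-1 ):
--              counts[ i ] += 2 * counts[ j ]
--      return counts[ treeHeight ]
-- ===== SOURCE B (Python) =====
-- def theMinCars(treeHeight):
--     # Single pass keeping a running prefix sum of earlier counts: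
--     # a = counts[i-2], b = counts[i-1], s = counts[0] + ... + counts[i-3].
--     a, b, s = 1, 1, 0
--     for _ in range(2, treeHeight + 1):
--         s += a
--         a, b = b, 1 + 2 * s
--     return b
-- ===== Notes on version B (the rewrite author's own statement) =====
-- stated objective: faster
-- what changed: Replaces the table of all counts with its nested re-summation loop by a single pass that carries the last two counts and a running prefix sum, so each new count is computed in O(1).
import Mathlib
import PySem

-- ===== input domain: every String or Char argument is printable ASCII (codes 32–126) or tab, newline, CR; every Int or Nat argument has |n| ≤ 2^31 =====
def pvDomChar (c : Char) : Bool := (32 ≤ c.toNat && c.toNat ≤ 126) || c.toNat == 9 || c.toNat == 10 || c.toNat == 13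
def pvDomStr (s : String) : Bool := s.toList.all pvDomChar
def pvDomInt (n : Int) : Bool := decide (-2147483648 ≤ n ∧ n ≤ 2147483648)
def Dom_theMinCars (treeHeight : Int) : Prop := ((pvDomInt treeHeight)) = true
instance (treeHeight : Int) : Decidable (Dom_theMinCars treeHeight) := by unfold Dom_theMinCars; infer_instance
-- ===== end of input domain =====

-- B replaces A's quadratic table re-summation by a single pass carrying the
-- last two counts and a running prefix sum (objective: faster).

-- ===== PORT A =====
def theMinCars (treeHeight : Int) : Int :=
  let counts : List Int := List.replicate (treeHeight + 2).toNat 0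
  let counts := PySem.List.pySetD counts 0 1
  let counts := PySem.List.pySetD counts 1 1
  let counts := (PySem.List.pyRange 2 (treeHeight + 1) 1).foldl (fun counts i =>
    (PySem.List.pyRange 0 (i - 1) 1).foldl (fun counts j =>
      PySem.List.pySetD counts i
        (PySem.List.pyGetD counts i 0 + 2 * PySem.List.pyGetD counts j 0))
      (PySem.List.pySetD counts i 1)) counts
  PySem.List.pyGetD counts treeHeight 0

-- ===== PORT B =====
def theMinCars_alt (treeHeight : Int) : Int :=
  let st := (PySem.List.pyRange 2 (treeHeight + 1) 1).foldl
    (fun (st : Int × Int × Int) _ =>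
      let s' := st.2.2 + st.1
      (st.2.1, 1 + 2 * s', s')) (1, 1, 0)
  st.2.1

-- ===== PRECONDITION & SPEC =====
-- Pre_ excludes exactly treeHeight < 0, where Python A raises IndexError.
def Pre_theMinCars (treeHeight : Int) : Prop := 0 ≤ treeHeight
instance (treeHeight : Int) : Decidable (Pre_theMinCars treeHeight) := by unfold Pre_theMinCars; infer_instance
def pvWitness_theMinCars : Int := 4

def Spec_theMinCars (treeHeight : Int) (out : Int) : Prop := out = theMinCars_alt treeHeight
instance (treeHeight : Int) (out : Int) : Decidable (Spec_theMinCars treeHeight out) := by unfold Spec_theMinCars; infer_instance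

-- ===== CLAIM (what is proved, stated in full; the proofs are below) =====
def Claim_equal_theMinCars : Prop := ∀ (treeHeight : Int), Dom_theMinCars treeHeight → Pre_theMinCars treeHeight → Spec_theMinCars treeHeight (theMinCars treeHeight)

-- ===== LEMMAS AND PROOFS =====

-- Reference recurrence: pvSt k = (c k, c (k+1), c 0 + … + c (k-1)).
def pvSt : Nat → Int × Int × Int
  | 0 => (1, 1, 0)
  | k+1 => let p := pvSt k; (p.2.1, 1 + 2 * (p.2.2 + p.1), p.2.2 + p.1)

def pvC (n : Nat) : Int := (pvSt n).1

lemma pvSt_fst_succ (k : Nat) : (pvSt (k+1)).1 = (pvSt k).2.1 := by simp [pvSt]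

lemma pvSt_snd_snd (k : Nat) :
    (pvSt k).2.2 = ((List.range k).map pvC).sum := by
  induction k with
  | zero => simp [pvSt]
  | succ k ih => simp [pvSt, ih, List.range_succ, pvC]

lemma pvC_succ_succ (k : Nat) :
    pvC (k+2) = 1 + 2 * ((List.range (k+1)).map pvC).sum := by
  simp [pvC, pvSt, pvSt_snd_snd, List.range_succ]

lemma pv_set_getD_self (l : List Int) (i : Nat) (h : i < l.length) :
    l.set i (l.getD i 0) = l := by
  apply List.ext_getElem?
  intro j
  by_cases hj : j = i <;> simp [hj, List.getD_eq_getElem?_getD, h]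

lemma pv_getD_set_ne (l : List Int) (i j : Nat) (v : Int) (h : j ≠ i) :
    (l.set i v).getD j 0 = l.getD j 0 := by
  simp [List.getD_eq_getElem?_getD, show i ≠ j from fun hh => h hh.symm]

lemma pv_getD_set_self (l : List Int) (i : Nat) (v : Int) (h : i < l.length) :
    (l.set i v).getD i 0 = v := by
  simp [List.getD_eq_getElem?_getD, h]

-- A's inner loop: every write targets position i, every read a position ≠ i.
lemma inner_fold (js : List Int) (cs : List Int) (i : Nat) (hi : i < cs.length)
    (hjs : ∀ j ∈ js, 0 ≤ j ∧ j.toNat ≠ i) :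
    js.foldl (fun cs j =>
        PySem.List.pySetD cs (i : Int)
          (PySem.List.pyGetD cs (i : Int) 0 + 2 * PySem.List.pyGetD cs j 0)) cs
    = cs.set i (cs.getD i 0 + 2 * (js.map (fun j => cs.getD j.toNat 0)).sum) := by
  induction js generalizing cs with
  | nil =>
      simp only [List.foldl_nil, List.map_nil, List.sum_nil, mul_zero, add_zero]
      exact (pv_set_getD_self cs i hi).symm
  | cons j js ih =>
      obtain ⟨hj0, hjne⟩ := hjs j (by simp)
      have hread : PySem.List.pyGetD cs (j : Int) 0 = cs.getD j.toNat 0 := by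
        rw [PySem.List.pyGetD_of_nonneg cs 0 hj0]
      simp only [List.foldl_cons, List.map_cons, List.sum_cons]
      rw [PySem.List.pySetD_natCast, PySem.List.pyGetD_natCast, hread]
      rw [ih (cs.set i (cs.getD i 0 + 2 * cs.getD j.toNat 0)) (by simpa using hi)
            (fun j' hj' => hjs j' (by simp [hj']))]
      rw [List.set_set]
      have hmap : (js.map (fun j' => (cs.set i (cs.getD i 0 + 2 * cs.getD j.toNat 0)).getD j'.toNat 0))
          = js.map (fun j' => cs.getD j'.toNat 0) := by
        apply List.map_congr_left
        intro j' hj'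
        exact pv_getD_set_ne cs i j'.toNat _ (hjs j' (by simp [hj'])).2
      rw [hmap, pv_getD_set_self cs i _ hi]
      congr 1
      ring

-- A's outer loop invariant: the first H+1 entries of the table are pvC 0 … pvC H.
lemma outer_fold (L H : Nat) (hL : H + 2 ≤ L) :
    ((PySem.List.pyRange 2 ((H : Int) + 1) 1).foldl (fun counts i =>
        (PySem.List.pyRange 0 (i - 1) 1).foldl (fun counts j =>
          PySem.List.pySetD counts i
            (PySem.List.pyGetD counts i 0 + 2 * PySem.List.pyGetD counts j 0))
          (PySem.List.pySetD counts i 1))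
        (((List.replicate L (0:Int)).set 0 1).set 1 1)).length = L ∧
    ∀ n ≤ H,
      ((PySem.List.pyRange 2 ((H : Int) + 1) 1).foldl (fun counts i =>
        (PySem.List.pyRange 0 (i - 1) 1).foldl (fun counts j =>
          PySem.List.pySetD counts i
            (PySem.List.pyGetD counts i 0 + 2 * PySem.List.pyGetD counts j 0))
          (PySem.List.pySetD counts i 1))
        (((List.replicate L (0:Int)).set 0 1).set 1 1)).getD n 0 = pvC n := by
  have hbase0 : (((List.replicate L (0:Int)).set 0 1).set 1 1).getD 0 0 = 1 := by
    rw [pv_getD_set_ne _ 1 0 _ (by omega), pv_getD_set_self _ 0 _ (by simp; omega)]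
  have hbase1 : (((List.replicate L (0:Int)).set 0 1).set 1 1).getD 1 0 = 1 := by
    rw [pv_getD_set_self _ 1 _ (by simp; omega)]
  induction H with
  | zero =>
      rw [PySem.List.pyRange_one_eq_nil (by norm_num)]
      simp only [List.foldl_nil]
      refine ⟨by simp, ?_⟩
      intro n hn
      interval_cases n
      rw [hbase0]; simp [pvC, pvSt]
  | succ H ih =>
      by_cases hH : H = 0
      · subst hH
        rw [show (((0+1 : Nat)) : Int) + 1 = 2 by norm_num, PySem.List.pyRange_one_eq_nil (by norm_num)]
        simp only [List.foldl_nil]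
        refine ⟨by simp, ?_⟩
        intro n hn
        interval_cases n
        · rw [hbase0]; simp [pvC, pvSt]
        · rw [hbase1]; simp [pvC, pvSt]
      · obtain ⟨hlen, hget⟩ := ih (by omega)
        have hpeel : PySem.List.pyRange 2 (((H+1 : Nat) : Int) + 1) 1
            = PySem.List.pyRange 2 ((H : Int) + 1) 1 ++ [(H : Int) + 1] := by
          have h2 : ((H+1 : Nat) : Int) + 1 = ((H : Int) + 1) + 1 := by push_cast; ring
          rw [h2, PySem.List.pyRange_one_succ_right (show (2:Int) ≤ (H : Int) + 1 by omega)]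
        rw [hpeel]
        simp only [List.foldl_append, List.foldl_cons, List.foldl_nil]
        set cs := (PySem.List.pyRange 2 ((H : Int) + 1) 1).foldl (fun counts i =>
          (PySem.List.pyRange 0 (i - 1) 1).foldl (fun counts j =>
            PySem.List.pySetD counts i
              (PySem.List.pyGetD counts i 0 + 2 * PySem.List.pyGetD counts j 0))
            (PySem.List.pySetD counts i 1))
          (((List.replicate L (0:Int)).set 0 1).set 1 1) with hcs
        have hcast : (H : Int) + 1 = ((H+1 : Nat) : Int) := by push_cast; ring
        have hcast2 : (H : Int) + 1 - 1 = (H : Int) := by ring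
        rw [hcast2, hcast, PySem.List.pySetD_natCast]
        rw [inner_fold (PySem.List.pyRange 0 (H : Int) 1) (cs.set (H+1) 1) (H+1)
              (by simp [hlen]; omega)
              (by intro j hj
                  rw [PySem.List.mem_pyRange_one] at hj
                  omega)]
        rw [List.set_set]
        have hval : (cs.set (H+1) 1).getD (H+1) 0
            + 2 * ((PySem.List.pyRange 0 (H : Int) 1).map
                (fun j => (cs.set (H+1) 1).getD j.toNat 0)).sum = pvC (H+1) := by
          rw [pv_getD_set_self cs (H+1) 1 (by omega)]
          rw [PySem.List.pyRange_zero_natCast, List.map_map]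
          have hmap : (List.range H).map ((fun j : Int => (cs.set (H+1) 1).getD j.toNat 0) ∘ (fun k : Nat => (k : Int)))
              = (List.range H).map pvC := by
            apply List.map_congr_left
            intro k hk
            rw [List.mem_range] at hk
            simp only [Function.comp, Int.toNat_natCast]
            rw [pv_getD_set_ne cs (H+1) k _ (by omega)]
            exact hget k (by omega)
          rw [hmap]
          obtain ⟨K, rfl⟩ : ∃ K, H = K + 1 := ⟨H - 1, by omega⟩
          rw [pvC_succ_succ K]
        rw [hval]
        refine ⟨by simp [hlen], ?_⟩
        intro n hn
        by_cases hn1 : n = H + 1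
        · subst hn1
          rw [pv_getD_set_self cs (H+1) _ (by omega)]
        · rw [pv_getD_set_ne cs (H+1) n _ hn1]
          exact hget n (by omega)

lemma theMinCars_eq_c (H : Nat) : theMinCars (H : Int) = pvC H := by
  simp only [theMinCars]
  have h2 : ((H : Int) + 2).toNat = H + 2 := by omega
  have hset : PySem.List.pySetD (PySem.List.pySetD (List.replicate (H+2) (0:Int)) 0 1) 1 1
      = ((List.replicate (H+2) (0:Int)).set 0 1).set 1 1 := by
    rw [PySem.List.pySetD_of_nonneg _ _ (by norm_num), PySem.List.pySetD_of_nonneg _ _ (by norm_num)]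
    norm_num
  rw [h2, hset, PySem.List.pyGetD_natCast]
  exact (outer_fold (H+2) H (by omega)).2 H le_rfl

lemma theMinCars_alt_eq_c (H : Nat) : theMinCars_alt (H : Int) = pvC H := by
  unfold theMinCars_alt
  have hfold : ∀ (l : List Int) (k : Nat),
      l.foldl (fun (st : Int × Int × Int) _ =>
        let s' := st.2.2 + st.1
        (st.2.1, 1 + 2 * s', s')) (pvSt k) = pvSt (k + l.length) := by
    intro l
    induction l with
    | nil => intro k; simp
    | cons x l ih =>
        intro k
        have h1 : ((pvSt k).2.1, 1 + 2 * ((pvSt k).2.2 + (pvSt k).1), (pvSt k).2.2 + (pvSt k).1) = pvSt (k+1) := by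
          simp [pvSt]
        simp only [List.foldl_cons]
        rw [h1, ih]
        congr 1
        simp [List.length_cons]
        omega
  have hlen : (PySem.List.pyRange 2 ((H : Int) + 1) 1).length = H - 1 := by
    rw [PySem.List.length_pyRange_one]
    omega
  rw [show ((1:Int), (1:Int), (0:Int)) = pvSt 0 from rfl, hfold, hlen]
  cases H with
  | zero => simp [pvSt, pvC]
  | succ K =>
      have : K + 1 - 1 = K := by omega
      rw [this, show (0 + K) = K by omega, pvC, pvSt_fst_succ]

-- ===== VERDICT (by name: the statement is the Claim_ definition above) =====
theorem theMinCars_spec : Claim_equal_theMinCars := by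
  intro h _ hpre
  unfold Spec_theMinCars
  obtain ⟨H, rfl⟩ : ∃ H : Nat, h = (H : Int) := ⟨h.toNat, (Int.toNat_of_nonneg hpre).symm⟩
  rw [theMinCars_eq_c, theMinCars_alt_eq_c]
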